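-- pv_equiv track=rewrite | github.com/LinaSyrota/lab_report | prob_theor/Лаб 5/lab_5.py | integerK
-- ===== SOURCE A (Python) =====
-- def integerK(Kmin, Kmax):
--     i = int(Kmin)
--     k = Kmin
--     while i <= Kmax:
--         if i >= Kmin:
--             k = i
--
--         i += 1
--
--     return k
-- ===== SOURCE B (Python) =====
-- def integerK(Kmin, Kmax):
--     # Largest integer in [Kmin, Kmax] if non-empty, else Kmin: that's max(Kmin, Kmax).
--     return max(Kmin, Kmax)
-- ===== Notes on version B (the rewrite author's own statement) =====
-- stated objective: faster
-- what changed: Replaced the O(Kmax-Kmin) counting loop with the closed form max(Kmin, Kmax).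
import Mathlib
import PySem

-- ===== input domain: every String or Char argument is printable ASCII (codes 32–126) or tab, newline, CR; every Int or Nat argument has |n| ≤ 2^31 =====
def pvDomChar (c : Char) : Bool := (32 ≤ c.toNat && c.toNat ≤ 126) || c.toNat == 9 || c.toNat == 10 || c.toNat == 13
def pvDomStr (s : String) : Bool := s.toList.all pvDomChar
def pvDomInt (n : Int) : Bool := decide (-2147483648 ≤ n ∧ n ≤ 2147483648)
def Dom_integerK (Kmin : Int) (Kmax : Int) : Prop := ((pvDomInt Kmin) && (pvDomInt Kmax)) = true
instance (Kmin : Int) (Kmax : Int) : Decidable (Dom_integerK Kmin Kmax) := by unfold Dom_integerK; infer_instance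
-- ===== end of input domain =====

-- B replaces A's linear counting loop with the closed form max(Kmin, Kmax); objective: faster (O(1)).

-- ===== PORT A =====
-- literal port of A's while-loop: i counts up from Kmin to Kmax, k records the last i ≥ Kmin
def integerKLoop (Kmin Kmax i k : Int) : Int :=
  if i ≤ Kmax then
    integerKLoop Kmin Kmax (i + 1) (if i ≥ Kmin then i else k)
  else k
termination_by (Kmax + 1 - i).toNat
decreasing_by
  have : i ≤ Kmax := by assumption
  omega

def integerK (Kmin : Int) (Kmax : Int) : Int :=
  integerKLoop Kmin Kmax Kmin Kmin

-- ===== PORT B =====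
def integerK_alt (Kmin : Int) (Kmax : Int) : Int := max Kmin Kmax

-- ===== PRECONDITION & SPEC =====
def Spec_integerK (Kmin : Int) (Kmax : Int) (out : Int) : Prop := out = integerK_alt Kmin Kmax
instance (Kmin : Int) (Kmax : Int) (out : Int) : Decidable (Spec_integerK Kmin Kmax out) := by unfold Spec_integerK; infer_instance

-- ===== CLAIM (what is proved, stated in full; the proofs are below) =====
def Claim_equal_integerK : Prop := ∀ (Kmin : Int) (Kmax : Int), Dom_integerK Kmin Kmax → Spec_integerK Kmin Kmax (integerK Kmin Kmax)

-- ===== LEMMAS AND PROOFS =====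
-- loop invariant: once i ≥ Kmin, the loop returns Kmax if it runs at all, else the accumulator
theorem integerKLoop_eq (Kmin Kmax : Int) : ∀ i k : Int, Kmin ≤ i →
    integerKLoop Kmin Kmax i k = if i ≤ Kmax then Kmax else k := by
  intro i k hi
  by_cases h : i ≤ Kmax
  · -- induction on remaining fuel
    have : ∀ n : ℕ, ∀ i k : Int, Kmin ≤ i → i ≤ Kmax → (Kmax - i).toNat = n →
        integerKLoop Kmin Kmax i k = Kmax := by
      intro n
      induction n with
      | zero =>
        intro i k hi hle hfuel
        have hik : i = Kmax := by omega
        subst hik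
        rw [integerKLoop]
        simp [hi]
        rw [integerKLoop]
        simp
      | succ m ih =>
        intro i k hi hle hfuel
        rw [integerKLoop]
        simp [hle, hi]
        exact ih (i + 1) i (by omega) (by omega) (by omega)
    simp [h, this (Kmax - i).toNat i k hi h rfl]
  · rw [integerKLoop]; simp [h]

-- ===== VERDICT (by name: the statement is the Claim_ definition above) =====
theorem integerK_spec : Claim_equal_integerK := by
  intro Kmin Kmax _
  unfold Spec_integerK integerK integerK_alt
  rw [integerKLoop_eq Kmin Kmax Kmin Kmin le_rfl]
  split_ifs with h <;> omega
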